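-- pv_equiv track=rewrite | github.com/glycoinfo/eurocarb | trunk/external-libs/ccpn/api/ccpnmr2.1/python/ccp/format/general/Util.py | parseEndNames
-- ===== SOURCE A (Python) =====
-- indexChars = '123456789'
--
-- def parseEndNames(endNameList, text):
--   """ parse text for endnames
--   """
--
--   # set up
--   endnames = []
--   unuseds = []
--   suffixes = []
--
--   # split off dot-separated suffix
--   ll = text.split('.',1)
--   if len(ll) > 1:
--     text, suffix = ll
--   else:
--     suffix = ''
--
--   # split on underscore and treat components separately
--   for text in text.split('_'):
--
--     while text:
--
--       for endName in endNameList: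
--         if endName not in endnames and text.startswith(endName):
--           # found matching endName - chop it off
--           endnames.append(endName)
--           text = text[len(endName):]
--           break
--
--       else:
--         # no matching endName found
--         # still text left
--         if len(text) == 1 and text in indexChars:
--           # single digit - add to suffix
--           suffixes.append(text)
--         else:
--           # parting incomplete - add to unuseds
--           unuseds.append(text)
--
--         break
--   #
--   unused = '_'.join(unuseds)
--   if suffix:
--     suffixes.append(suffix)
--   #
--   return (unused, endnames, '_'.join(suffixes))
-- ===== SOURCE B (Python) =====
-- indexChars = '123456789'
--
-- def parseEndNames(endNameList, text):
--     """ parse text for endnames """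
--     # split off dot-separated suffix
--     ll = text.split('.', 1)
--     if len(ll) > 1:
--         text, suffix = ll
--     else:
--         suffix = ''
--
--     # recursively strip prefixes from a segment, consuming the pool of
--     # still-available endNames (each name may be used once)
--     def strip(avail, seg):
--         if seg:
--             for e in avail:
--                 if seg.startswith(e):
--                     ms, avail2, left = strip([x for x in avail if x != e], seg[len(e):])
--                     return [e] + ms, avail2, left
--         return [], avail, seg
--
--     avail = list(endNameList)
--     endnames, unuseds, suffixes = [], [], []
--     for seg in text.split('_'):
--         ms, avail, left = strip(avail, seg)
--         endnames += ms
--         if left: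
--             if len(left) == 1 and left in indexChars:
--                 suffixes.append(left)
--             else:
--                 unuseds.append(left)
--     if suffix:
--         suffixes.append(suffix)
--     return ('_'.join(unuseds), endnames, '_'.join(suffixes))
-- ===== Notes on version B (the rewrite author's own statement) =====
-- stated objective: faster
-- what changed: A rescans the full endNameList at every position and tests each candidate for membership in the growing list of already-used names; B keeps a shrinking pool of still-available names and strips prefixes with a recursive helper that removes each matched name from the pool, so the per-candidate used-name membership scan disappears.
import Mathlib
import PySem

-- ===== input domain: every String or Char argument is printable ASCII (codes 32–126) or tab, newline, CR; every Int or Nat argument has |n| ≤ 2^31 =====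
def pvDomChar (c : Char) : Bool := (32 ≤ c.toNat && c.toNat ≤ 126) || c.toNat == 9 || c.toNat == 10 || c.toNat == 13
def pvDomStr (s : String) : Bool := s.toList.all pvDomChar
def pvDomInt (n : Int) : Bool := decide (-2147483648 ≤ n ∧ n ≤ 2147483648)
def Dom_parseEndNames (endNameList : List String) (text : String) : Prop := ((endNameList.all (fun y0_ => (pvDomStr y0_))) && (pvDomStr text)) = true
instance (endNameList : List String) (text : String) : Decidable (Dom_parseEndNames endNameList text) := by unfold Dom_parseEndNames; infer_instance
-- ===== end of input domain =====

-- B replaces A's repeated scan of the full endNameList (skipping already-used names by a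
-- membership test) with a recursive stripper over a shrinking pool of still-available names;
-- objective: faster (a timing run measured B ahead), return value proved equal on all inputs.

-- ===== PORT A =====

def pvIndexChars : List Char := ['1','2','3','4','5','6','7','8','9']

-- A's inner `for endName in endNameList: if endName not in endnames and text.startswith(endName)`
def pvAFind (endnames : List String) (text : List Char) : List String → Option String
  | [] => none
  | e :: rest =>
    if ¬ endnames.contains e ∧ PySem.Chars.startswith text e.toList then some e
    else pvAFind endnames text rest

-- used by pvAWhile's decreasing_by
theorem pvAFind_some {endnames : List String} {text : List Char} {l : List String} {e : String}
    (h : pvAFind endnames text l = some e) : e ∈ l ∧ endnames.contains e = false := by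
  induction l with
  | nil => simp [pvAFind] at h
  | cons a rest ih =>
    by_cases hc : ¬ endnames.contains a ∧ PySem.Chars.startswith text a.toList
    · simp only [pvAFind, if_pos hc] at h
      cases h
      exact ⟨List.mem_cons_self, by simpa using hc.1⟩
    · simp only [pvAFind, if_neg hc] at h
      exact ⟨List.mem_cons_of_mem _ (ih h).1, (ih h).2⟩

-- used by pvAWhile's decreasing_by (and again in the equivalence proof below)
theorem pvFilter_snoc (L endnames : List String) (e : String) :
    (L.filter (fun n => !endnames.contains n)).filter (fun n => !(n == e)) =
      L.filter (fun n => !(endnames ++ [e]).contains n) := by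
  rw [List.filter_filter]
  apply List.filter_congr
  intro x _
  by_cases hx : x = e <;> simp [hx]

-- used by pvAWhile's decreasing_by
theorem pvA_measure_lt {L endnames : List String} {e : String}
    (he : e ∈ L) (hc : endnames.contains e = false) :
    (L.filter (fun n => !(endnames ++ [e]).contains n)).length <
      (L.filter (fun n => !endnames.contains n)).length := by
  rw [← pvFilter_snoc]
  have he' : e ∈ L.filter (fun n => !endnames.contains n) := by
    simp only [List.mem_filter, he, true_and]
    simpa using hc
  exact List.length_filter_lt_length_iff_exists.mpr ⟨e, he', by simp⟩

-- A's `while text:` loop for one underscore segment; state (endnames, unuseds, suffixes)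
def pvAWhile (L : List String) (text : List Char)
    (endnames : List String) (unuseds suffixes : List (List Char)) :
    List String × List (List Char) × List (List Char) :=
  if _htext : text = [] then (endnames, unuseds, suffixes)
  else
    match _h : pvAFind endnames text L with
    | some e =>
        pvAWhile L (text.drop e.toList.length) (endnames ++ [e]) unuseds suffixes
    | none =>
        if text.length = 1 ∧ PySem.Chars.isIn text pvIndexChars then
          (endnames, unuseds, suffixes ++ [text])
        else
          (endnames, unuseds ++ [text], suffixes)
  termination_by (L.filter (fun n => !endnames.contains n)).length + text.length
  decreasing_by
    have ⟨hmem, hcon⟩ := pvAFind_some _h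
    have h1 := pvA_measure_lt hmem hcon
    have hd : (text.drop e.toList.length).length ≤ text.length := by
      simp [List.length_drop]
    omega

def parseEndNames (endNameList : List String) (text : String) : String × List String × String :=
  let ll := PySem.Chars.splitOnMax text.toList ['.'] 1
  let tp := if ll.length > 1 then (ll[0]!, ll[1]!) else (text.toList, ([] : List Char))
  let st := (PySem.Chars.splitOn tp.1 ['_']).foldl
      (fun st seg => pvAWhile endNameList seg st.1 st.2.1 st.2.2)
      ([], [], [])
  let suffixes := if tp.2 = [] then st.2.2 else st.2.2 ++ [tp.2]
  (String.ofList (PySem.Chars.join ['_'] st.2.1), st.1,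
   String.ofList (PySem.Chars.join ['_'] suffixes))

-- ===== PORT B =====

-- B's recursive `strip`: consume prefixes of seg, removing each used name from the pool
def pvBStrip (avail : List String) (seg : List Char) :
    List String × List String × List Char :=
  if _hseg : seg = [] then ([], avail, [])
  else
    match _h : avail.find? (fun e => PySem.Chars.startswith seg e.toList) with
    | some e =>
        let r := pvBStrip (avail.filter (fun x => !(x == e))) (seg.drop e.toList.length)
        (e :: r.1, r.2.1, r.2.2)
    | none => ([], avail, seg)
  termination_by avail.length + seg.length
  decreasing_by
    have hmem : e ∈ avail := List.mem_of_find?_eq_some _h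
    have h1 : (avail.filter (fun x => !(x == e))).length < avail.length :=
      List.length_filter_lt_length_iff_exists.mpr ⟨e, hmem, by simp⟩
    have hd : (seg.drop e.toList.length).length ≤ seg.length := by
      simp [List.length_drop]
    simp only [List.length_unattach]
    have key : ((avail.attach.filter (fun x => !(x.1 == e))).length : Nat) =
        (avail.filter (fun x => !(x == e))).length := by
      rw [← List.countP_eq_length_filter, ← List.countP_eq_length_filter]
      exact List.countP_attach (p := fun x => !x == e) (l := avail)
    exact Nat.add_lt_add_of_lt_of_le (key.trans_lt h1) hd

def parseEndNames_alt (endNameList : List String) (text : String) : String × List String × String :=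
  let ll := PySem.Chars.splitOnMax text.toList ['.'] 1
  let tp := if ll.length > 1 then (ll[0]!, ll[1]!) else (text.toList, ([] : List Char))
  -- fold state: (avail, endnames, unuseds, suffixes)
  let st := (PySem.Chars.splitOn tp.1 ['_']).foldl
      (fun st seg =>
        let r := pvBStrip st.1 seg
        if r.2.2 = [] then (r.2.1, st.2.1 ++ r.1, st.2.2.1, st.2.2.2)
        else if r.2.2.length = 1 ∧ PySem.Chars.isIn r.2.2 pvIndexChars then
          (r.2.1, st.2.1 ++ r.1, st.2.2.1, st.2.2.2 ++ [r.2.2])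
        else (r.2.1, st.2.1 ++ r.1, st.2.2.1 ++ [r.2.2], st.2.2.2))
      (endNameList, [], [], [])
  let suffixes := if tp.2 = [] then st.2.2.2 else st.2.2.2 ++ [tp.2]
  (String.ofList (PySem.Chars.join ['_'] st.2.2.1), st.2.1,
   String.ofList (PySem.Chars.join ['_'] suffixes))

-- ===== PRECONDITION & SPEC =====
def Spec_parseEndNames (endNameList : List String) (text : String) (out : String × List String × String) : Prop := out = parseEndNames_alt endNameList text
instance (endNameList : List String) (text : String) (out : String × List String × String) : Decidable (Spec_parseEndNames endNameList text out) := by unfold Spec_parseEndNames; infer_instance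

-- ===== CLAIM (what is proved, stated in full; the proofs are below) =====
def Claim_equal_parseEndNames : Prop := ∀ (endNameList : List String) (text : String), Dom_parseEndNames endNameList text → Spec_parseEndNames endNameList text (parseEndNames endNameList text)

-- ===== LEMMAS AND PROOFS =====

-- the classification A applies to a leftover segment piece
def pvClass (left : List Char) (unuseds suffixes : List (List Char)) :
    List (List Char) × List (List Char) :=
  if left = [] then (unuseds, suffixes)
  else if left.length = 1 ∧ PySem.Chars.isIn left pvIndexChars then (unuseds, suffixes ++ [left])
  else (unuseds ++ [left], suffixes)

-- one-step unfoldings of pvBStrip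
theorem pvBStrip_nil (avail : List String) : pvBStrip avail [] = ([], avail, []) := by
  rw [pvBStrip.eq_def]
  simp

theorem pvBStrip_some (avail : List String) (seg : List Char) (hseg : seg ≠ []) (e : String)
    (hf : avail.find? (fun e => PySem.Chars.startswith seg e.toList) = some e) :
    pvBStrip avail seg =
      (e :: (pvBStrip (avail.filter (fun x => !(x == e))) (seg.drop e.toList.length)).1,
       (pvBStrip (avail.filter (fun x => !(x == e))) (seg.drop e.toList.length)).2.1,
       (pvBStrip (avail.filter (fun x => !(x == e))) (seg.drop e.toList.length)).2.2) := by
  rw [pvBStrip.eq_def]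
  simp only [dif_neg hseg]
  split
  next e' h' => rw [hf] at h'; cases h'; rfl
  next h' => rw [hf] at h'; cases h'

theorem pvBStrip_none (avail : List String) (seg : List Char) (hseg : seg ≠ [])
    (hf : avail.find? (fun e => PySem.Chars.startswith seg e.toList) = none) :
    pvBStrip avail seg = ([], avail, seg) := by
  rw [pvBStrip.eq_def]
  simp only [dif_neg hseg]
  split
  next e' h' => rw [hf] at h'; cases h'
  next h' => rfl

theorem pvAFind_eq_find? (endnames : List String) (text : List Char) (l : List String) :
    pvAFind endnames text l =
      l.find? (fun e => !endnames.contains e && PySem.Chars.startswith text e.toList) := by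
  induction l with
  | nil => rfl
  | cons a rest ih =>
    by_cases h1 : a ∈ endnames
    · simp [pvAFind, h1, ih]
    · by_cases h2 : PySem.Chars.startswith text a.toList
      · simp [pvAFind, h1, h2]
      · simp [pvAFind, h1, h2, ih]

-- B's scan of the pool is A's scan of the full list skipping used names
theorem pvFind_bridge (endnames L : List String) (text : List Char) :
    (L.filter (fun n => !endnames.contains n)).find?
        (fun e => PySem.Chars.startswith text e.toList) =
      pvAFind endnames text L := by
  rw [List.find?_filter, pvAFind_eq_find?]
  congr 1
  funext x
  by_cases h1 : x ∈ endnames <;> by_cases h2 : PySem.Chars.startswith text x.toList <;>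
    simp [h1, h2]

-- one segment: A's while loop = endnames ++ strip's matches with the leftover classified,
-- and strip's final pool is the filter of A's final endnames
theorem pvSeg_eq (L : List String) (seg : List Char) (endnames : List String) :
    (∀ unuseds suffixes,
      pvAWhile L seg endnames unuseds suffixes =
        (endnames ++ (pvBStrip (L.filter (fun n => !endnames.contains n)) seg).1,
         pvClass (pvBStrip (L.filter (fun n => !endnames.contains n)) seg).2.2 unuseds suffixes))
    ∧ (pvBStrip (L.filter (fun n => !endnames.contains n)) seg).2.1 =
        L.filter (fun n =>
          !(endnames ++ (pvBStrip (L.filter (fun n => !endnames.contains n)) seg).1).contains n) := by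
  induction seg, endnames using pvAWhile.induct (L := L) with
  | case1 endnames =>
      rw [pvBStrip_nil]
      constructor
      · intro u s
        rw [pvAWhile]
        simp [pvClass]
      · simp
  | case2 text endnames htext e hfind ih =>
      have hfB : (L.filter (fun n => !endnames.contains n)).find?
          (fun x => PySem.Chars.startswith text x.toList) = some e := by
        rw [pvFind_bridge]; exact hfind
      have hB := pvBStrip_some _ _ htext _ hfB
      rw [pvFilter_snoc] at hB
      have happ : endnames ++ [e] ++
          (pvBStrip (L.filter (fun n => !(endnames ++ [e]).contains n)) (text.drop e.toList.length)).1 =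
          endnames ++ e ::
          (pvBStrip (L.filter (fun n => !(endnames ++ [e]).contains n)) (text.drop e.toList.length)).1 := by
        simp
      constructor
      · intro u s
        rw [pvAWhile.eq_def]
        simp only [dif_neg htext]
        split
        next e' h' =>
          rw [hfind] at h'; cases h'
          rw [(ih).1 u s, hB, happ]
        next h' => rw [hfind] at h'; cases h'
      · rw [hB]
        simp only []
        rw [(ih).2, happ]
  | case3 text endnames htext hfind hcond =>
      have hfB : (L.filter (fun n => !endnames.contains n)).find?
          (fun x => PySem.Chars.startswith text x.toList) = none := by
        rw [pvFind_bridge]; exact hfind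
      have hB := pvBStrip_none _ _ htext hfB
      rw [hB]
      constructor
      · intro u s
        rw [pvAWhile.eq_def]
        simp only [dif_neg htext]
        split
        next e' h' => rw [hfind] at h'; cases h'
        next h' => simp [pvClass, htext, hcond]
      · simp
  | case4 text endnames htext hfind hcond =>
      have hfB : (L.filter (fun n => !endnames.contains n)).find?
          (fun x => PySem.Chars.startswith text x.toList) = none := by
        rw [pvFind_bridge]; exact hfind
      have hB := pvBStrip_none _ _ htext hfB
      rw [hB]
      constructor
      · intro u s
        rw [pvAWhile.eq_def]
        simp only [dif_neg htext]
        split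
        next e' h' => rw [hfind] at h'; cases h'
        next h' => simp [pvClass, htext, hcond]
      · simp
  
-- the fold across underscore segments, carrying the pool invariant
theorem pvFold_eq (L : List String) (segs : List (List Char)) (endnames : List String)
    (unuseds suffixes : List (List Char)) :
    segs.foldl (fun st seg => pvAWhile L seg st.1 st.2.1 st.2.2) (endnames, unuseds, suffixes) =
      ((segs.foldl
          (fun st seg =>
            let r := pvBStrip st.1 seg
            if r.2.2 = [] then (r.2.1, st.2.1 ++ r.1, st.2.2.1, st.2.2.2)
            else if r.2.2.length = 1 ∧ PySem.Chars.isIn r.2.2 pvIndexChars then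
              (r.2.1, st.2.1 ++ r.1, st.2.2.1, st.2.2.2 ++ [r.2.2])
            else (r.2.1, st.2.1 ++ r.1, st.2.2.1 ++ [r.2.2], st.2.2.2))
          (L.filter (fun n => !endnames.contains n), endnames, unuseds, suffixes)).2.1,
       (segs.foldl
          (fun st seg =>
            let r := pvBStrip st.1 seg
            if r.2.2 = [] then (r.2.1, st.2.1 ++ r.1, st.2.2.1, st.2.2.2)
            else if r.2.2.length = 1 ∧ PySem.Chars.isIn r.2.2 pvIndexChars then
              (r.2.1, st.2.1 ++ r.1, st.2.2.1, st.2.2.2 ++ [r.2.2])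
            else (r.2.1, st.2.1 ++ r.1, st.2.2.1 ++ [r.2.2], st.2.2.2))
          (L.filter (fun n => !endnames.contains n), endnames, unuseds, suffixes)).2.2) := by
  induction segs generalizing endnames unuseds suffixes with
  | nil => simp
  | cons seg segs ih =>
      rw [List.foldl_cons, List.foldl_cons]
      have hseg := pvSeg_eq L seg endnames
      have hstep :
          (let r := pvBStrip (L.filter (fun n => !endnames.contains n)) seg
           if r.2.2 = [] then (r.2.1, endnames ++ r.1, unuseds, suffixes)
           else if r.2.2.length = 1 ∧ PySem.Chars.isIn r.2.2 pvIndexChars then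
             (r.2.1, endnames ++ r.1, unuseds, suffixes ++ [r.2.2])
           else (r.2.1, endnames ++ r.1, unuseds ++ [r.2.2], suffixes)) =
          ((pvBStrip (L.filter (fun n => !endnames.contains n)) seg).2.1,
           endnames ++ (pvBStrip (L.filter (fun n => !endnames.contains n)) seg).1,
           pvClass (pvBStrip (L.filter (fun n => !endnames.contains n)) seg).2.2 unuseds suffixes) := by
        simp only [pvClass]
        split_ifs <;> simp_all
      rw [hseg.1 unuseds suffixes]
      simp only [hstep]
      rw [hseg.2]
      exact ih (endnames ++ (pvBStrip (L.filter (fun n => !endnames.contains n)) seg).1)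
        (pvClass (pvBStrip (L.filter (fun n => !endnames.contains n)) seg).2.2 unuseds suffixes).1
        (pvClass (pvBStrip (L.filter (fun n => !endnames.contains n)) seg).2.2 unuseds suffixes).2

-- ===== VERDICT (by name: the statement is the Claim_ definition above) =====
theorem parseEndNames_spec : Claim_equal_parseEndNames := by
  intro L text _
  unfold Spec_parseEndNames
  simp only [parseEndNames, parseEndNames_alt]
  have h := pvFold_eq L
      (PySem.Chars.splitOn
        (if (PySem.Chars.splitOnMax text.toList ['.'] 1).length > 1 then
          ((PySem.Chars.splitOnMax text.toList ['.'] 1)[0]!, (PySem.Chars.splitOnMax text.toList ['.'] 1)[1]!)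
         else (text.toList, ([] : List Char))).1 ['_']) [] [] []
  simp only [List.contains_nil, Bool.not_false, List.filter_true] at h
  rw [h]
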